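-- pv_equiv track=rewrite | github.com/Pinafore/qb | util/shared_task_to_buzz.py | word_position_to_sent
-- ===== SOURCE A (Python) =====
-- def word_position_to_sent(questions, question, position):
--     assert question in questions, "%i not in questions" % question
--     count = 0
--     for ss, sent in enumerate(questions[question]):
--         for ww, word in enumerate(sent.split()):
--             count += 1
--             if count >= position:
--                 return ss, ww
--     return ss, ww
-- ===== SOURCE B (Python) =====
-- def word_position_to_sent(questions, question, position):
--     assert question in questions, "%i not in questions" % question
--     table = [(ss, ww)
--              for ss, sent in enumerate(questions[question])
--              for ww in range(len(sent.split()))]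
--     idx = min(max(position, 1), len(table)) - 1
--     return table[idx]
-- ===== Notes on version B (the rewrite author's own statement) =====
-- stated objective: alternative
-- what changed: Replaces the streaming nested scan with early exit by precomputing the flat (sentence, word) coordinate table once and returning a single clamped lookup table[min(max(position,1),len(table))-1].
-- intended difference: When position exceeds the total word count and the question's last sentence has no words, A's fall-through returns (last sentence index, leftover word index from an earlier sentence) — a coordinate of a nonexistent word — while B returns the coordinates of the last actual word, which is the intended clamp. — e.g. on word_position_to_sent([(0, ["a", ""])], 0, 5): A returns (1, 0), B returns (0, 0)
import Mathlib
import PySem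

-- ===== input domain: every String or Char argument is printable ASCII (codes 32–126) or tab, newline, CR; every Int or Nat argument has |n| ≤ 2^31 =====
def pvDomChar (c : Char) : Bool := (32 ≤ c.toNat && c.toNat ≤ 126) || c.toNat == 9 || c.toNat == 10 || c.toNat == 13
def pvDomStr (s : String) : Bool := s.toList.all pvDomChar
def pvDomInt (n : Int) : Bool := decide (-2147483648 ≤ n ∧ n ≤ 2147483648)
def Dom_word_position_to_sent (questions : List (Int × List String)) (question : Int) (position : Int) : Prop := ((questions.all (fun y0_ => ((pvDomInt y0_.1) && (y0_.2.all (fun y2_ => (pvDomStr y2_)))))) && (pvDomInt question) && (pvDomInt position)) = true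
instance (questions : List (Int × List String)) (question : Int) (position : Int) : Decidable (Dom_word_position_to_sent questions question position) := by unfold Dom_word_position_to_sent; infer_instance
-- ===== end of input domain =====

-- B replaces A's streaming nested scan with early exit by a precomputed flat coordinate
-- table plus one clamped lookup (objective: alternative; same cost).

-- ===== PORT A =====
-- inner loop 'for ww, word in enumerate(sent.split()): count += 1; if count >= position: return ss, ww'
-- returns (early result?, updated count, last ww bound)  (none in the Option Int = variable still unbound)
def pvAInner (ss position : Int) : List String → Int → Int → Option Int → Option (Int × Int) × Int × Option Int
  | [], _, count, ww => (none, count, ww)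
  | _ :: rest, w, count, _ =>
      if position ≤ count + 1 then (some (ss, w), count + 1, some w)
      else pvAInner ss position rest (w + 1) (count + 1) (some w)

-- outer loop 'for ss, sent in enumerate(questions[question])'; the fall-through 'return ss, ww'
-- reads the leftover loop variables (getD 0 is unreachable under Pre_: there it is Python's UnboundLocalError)
def pvAOuter (position : Int) : List String → Int → Int → Option Int → Option Int → Int × Int
  | [], _, _, ss, ww => (ss.getD 0, ww.getD 0)
  | sent :: rest, s, count, _, ww =>
      match pvAInner s position (PySem.Str.split₀ sent) 0 count ww with
      | (some r, _, _) => r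
      | (none, count', ww') => pvAOuter position rest (s + 1) count' (some s) ww'

def word_position_to_sent (questions : List (Int × List String)) (question : Int) (position : Int) : Int × Int :=
  pvAOuter position (((PySem.Dict.mk questions).get? question).getD []) 0 0 none none

-- ===== PORT B =====
-- the comprehension '[(ss, ww) for ss, sent in enumerate(...) for ww in range(len(sent.split()))]'
def pvBTable : Int → List String → List (Int × Int)
  | _, [] => []
  | ss, sent :: rest =>
      (PySem.List.pyRange 0 ((PySem.Str.split₀ sent).length : Int) 1).map (fun ww => (ss, ww))
        ++ pvBTable (ss + 1) rest

def word_position_to_sent_alt (questions : List (Int × List String)) (question : Int) (position : Int) : Int × Int :=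
  let table := pvBTable 0 (((PySem.Dict.mk questions).get? question).getD [])
  let idx := min (max position 1) ((table.length : Int)) - 1
  (PySem.List.pyGet? table idx).getD (0, 0)

-- ===== PRECONDITION & SPEC =====
-- Pre_ excludes exactly the inputs where A raises: question not a key (AssertionError) or the
-- question's sentences contain no word at all (UnboundLocalError at the fall-through return).
def Pre_word_position_to_sent (questions : List (Int × List String)) (question : Int) (position : Int) : Prop :=
  ((((PySem.Dict.mk questions).get? question).getD []).any
      (fun s => !(PySem.Str.split₀ s).isEmpty)) = true
instance (questions : List (Int × List String)) (question : Int) (position : Int) : Decidable (Pre_word_position_to_sent questions question position) := by unfold Pre_word_position_to_sent; infer_instance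

def pvWitness_word_position_to_sent : (List (Int × List String)) × Int × Int := ([(0, ["a b"])], 0, 1)

-- When position exceeds the total word count and the question's last sentence has no words, A's
-- fall-through returns (last sentence index, leftover word index of an earlier sentence) — the
-- coordinate of a nonexistent word — while B returns the last actual word's coordinates, the intended clamp.
def D_word_position_to_sent (questions : List (Int × List String)) (question : Int) (position : Int) : Prop :=
  let sents := ((PySem.Dict.mk questions).get? question).getD []
  (((sents.map (fun s => (PySem.Str.split₀ s).length)).sum : Int) < position) ∧
  PySem.Str.split₀ (sents.getLastD "") = []
instance (questions : List (Int × List String)) (question : Int) (position : Int) : Decidable (D_word_position_to_sent questions question position) := by unfold D_word_position_to_sent; infer_instance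

def Spec_word_position_to_sent (questions : List (Int × List String)) (question : Int) (position : Int) (out : Int × Int) : Prop := ¬ D_word_position_to_sent questions question position → out = word_position_to_sent_alt questions question position
instance (questions : List (Int × List String)) (question : Int) (position : Int) (out : Int × Int) : Decidable (Spec_word_position_to_sent questions question position out) := by unfold Spec_word_position_to_sent; infer_instance

def pvDiffWitness_word_position_to_sent : (List (Int × List String)) × Int × Int := ([(0, ["a", ""])], 0, 5)
def pvDiffWitnessOut_word_position_to_sent : (Int × Int) × (Int × Int) := ((1, 0), (0, 0))

-- ===== CLAIM (what is proved, stated in full; the proofs are below) =====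
def Claim_unchanged_word_position_to_sent : Prop := ∀ (questions : List (Int × List String)) (question : Int) (position : Int), Dom_word_position_to_sent questions question position → Pre_word_position_to_sent questions question position → Spec_word_position_to_sent questions question position (word_position_to_sent questions question position)
def Claim_changed_word_position_to_sent : Prop := Dom_word_position_to_sent (pvDiffWitness_word_position_to_sent.1) (pvDiffWitness_word_position_to_sent.2.1) (pvDiffWitness_word_position_to_sent.2.2) ∧ Pre_word_position_to_sent (pvDiffWitness_word_position_to_sent.1) (pvDiffWitness_word_position_to_sent.2.1) (pvDiffWitness_word_position_to_sent.2.2) ∧ D_word_position_to_sent (pvDiffWitness_word_position_to_sent.1) (pvDiffWitness_word_position_to_sent.2.1) (pvDiffWitness_word_position_to_sent.2.2) ∧ word_position_to_sent (pvDiffWitness_word_position_to_sent.1) (pvDiffWitness_word_position_to_sent.2.1) (pvDiffWitness_word_position_to_sent.2.2) = pvDiffWitnessOut_word_position_to_sent.1 ∧ word_position_to_sent_alt (pvDiffWitness_word_position_to_sent.1) (pvDiffWitness_word_position_to_sent.2.1) (pvDiffWitness_word_position_to_sent.2.2) = pvDiffWitnessOut_word_position_to_sent.2 ∧ pvDiffWitnessOut_word_position_to_sent.1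 ≠ pvDiffWitnessOut_word_position_to_sent.2
def Claim_exact_word_position_to_sent : Prop := ∀ (questions : List (Int × List String)) (question : Int) (position : Int), Dom_word_position_to_sent questions question position → Pre_word_position_to_sent questions question position → D_word_position_to_sent questions question position → word_position_to_sent questions question position ≠ word_position_to_sent_alt questions question position

-- ===== LEMMAS AND PROOFS =====

-- the word index left in 'ww' after the loops (none = never bound)
def pvLastWW (sents : List String) (ww0 : Option Int) : Option Int :=
  sents.foldl (fun acc sent =>
    if (PySem.Str.split₀ sent).isEmpty then acc
    else some (((PySem.Str.split₀ sent).length : Int) - 1)) ww0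

lemma pvAInner_eq (ss position : Int) (ws : List String) (w c : Int) (ww0 : Option Int) :
    pvAInner ss position ws w c ww0 =
      if ws ≠ [] ∧ position ≤ c + (ws.length : Int) then
        (some (ss, w + max (position - c) 1 - 1), c + max (position - c) 1,
          some (w + max (position - c) 1 - 1))
      else (none, c + (ws.length : Int), if ws.isEmpty then ww0 else some (w + (ws.length : Int) - 1)) := by
  induction ws generalizing w c ww0 with
  | nil => simp [pvAInner]
  | cons x rest ih =>
    rw [pvAInner]
    by_cases h1 : position ≤ c + 1
    · rw [if_pos h1]
      have hmax : max (position - c) 1 = 1 := by omega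
      rw [if_pos ⟨by simp, by simp; push_cast; omega⟩, hmax]
      norm_num
    · rw [if_neg h1, ih]
      by_cases h2 : rest ≠ [] ∧ position ≤ c + 1 + (rest.length : Int)
      · rw [if_pos h2, if_pos ⟨by simp, by simp; push_cast; omega⟩]
        have h3 : max (position - (c + 1)) 1 = position - c - 1 := by omega
        have h4 : max (position - c) 1 = position - c := by omega
        rw [h3, h4]
        refine Prod.ext ?_ (Prod.ext ?_ ?_) <;> simp <;> omega
      · rw [if_neg h2]
        rcases Decidable.em (rest = []) with hr | hr
        · subst hr
          simp only [List.isEmpty_nil, if_true, List.length_nil, List.length_cons]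
          rw [if_neg (by simp; omega)]
          simp
        · have h2' : ¬ position ≤ c + 1 + (rest.length : Int) := fun hc => h2 ⟨hr, hc⟩
          have hcond : ¬(x :: rest ≠ [] ∧ position ≤ c + ((x :: rest).length : Int)) := by
            simp only [ne_eq, List.length_cons]
            push_cast
            intro hc
            exact h2' (by omega)
          rw [if_neg hcond]
          simp [hr]
          constructor <;> push_cast <;> omega

lemma pvAOuter_eq (position : Int) (sents : List String) (s c : Int)
    (ss0 ww0 : Option Int) :
    pvAOuter position sents s c ss0 ww0 =
      if pvBTable s sents ≠ [] ∧ position ≤ c + ((pvBTable s sents).length : Int) then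
        (pvBTable s sents).getD (max (position - c) 1 - 1).toNat (0, 0)
      else
        ((if sents.isEmpty then ss0 else some (s + (sents.length : Int) - 1)).getD 0,
         (pvLastWW sents ww0).getD 0) := by
  induction sents generalizing s c ss0 ww0 with
  | nil => simp [pvAOuter, pvBTable, pvLastWW]
  | cons sent rest ih =>
    have hfl : ((PySem.List.pyRange 0 ((PySem.Str.split₀ sent).length : Int) 1).map
        (fun ww => ((s : Int), ww))).length = (PySem.Str.split₀ sent).length := by
      simp [PySem.List.length_pyRange_one]
    by_cases hA : PySem.Str.split₀ sent ≠ [] ∧ position ≤ c + ((PySem.Str.split₀ sent).length : Int)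
    · rw [pvAOuter, pvAInner_eq, if_pos hA]
      show (s, 0 + max (position - c) 1 - 1) = _
      have hk1 : (1:Int) ≤ max (position - c) 1 := le_max_right _ _
      have hkn : max (position - c) 1 ≤ ((PySem.Str.split₀ sent).length : Int) := by
        rcases hA with ⟨h1, h2⟩
        have : (PySem.Str.split₀ sent).length ≠ 0 := by simpa using h1
        omega
      have hTne : pvBTable s (sent :: rest) ≠ [] := by
        rw [pvBTable]
        intro h
        rcases List.append_eq_nil_iff.mp h with ⟨h1, _⟩
        have := congrArg List.length h1
        rw [hfl] at this
        rcases hA with ⟨ha, _⟩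
        exact ha (List.length_eq_zero_iff.mp this)
      have hTlen : position ≤ c + ((pvBTable s (sent :: rest)).length : Int) := by
        rw [pvBTable, List.length_append, hfl]
        push_cast
        omega
      rw [if_pos ⟨hTne, hTlen⟩, pvBTable]
      have hidx : (max (position - c) 1 - 1).toNat < (PySem.Str.split₀ sent).length := by omega
      rw [List.getD_append _ _ _ _ (by rw [hfl]; exact hidx)]
      rw [List.getD_eq_getElem?_getD, PySem.List.getElem?_map_pyRange_zero _ _ _ hidx]
      simp
    · rw [pvAOuter, pvAInner_eq, if_neg hA]
      show pvAOuter position rest (s+1) (c + ((PySem.Str.split₀ sent).length : Int)) (some s) _ = _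
      rw [ih]
      have hlen : ((pvBTable s (sent :: rest)).length : Int)
          = ((PySem.Str.split₀ sent).length : Int) + ((pvBTable (s+1) rest).length : Int) := by
        rw [pvBTable, List.length_append, hfl]; push_cast; ring
      have hnA : PySem.Str.split₀ sent = [] ∨
          c + ((PySem.Str.split₀ sent).length : Int) < position := by
        by_cases h : PySem.Str.split₀ sent = []
        · exact Or.inl h
        · right
          by_contra hc
          exact hA ⟨h, by omega⟩
      by_cases hB : pvBTable (s+1) rest ≠ [] ∧
          position ≤ c + ((PySem.Str.split₀ sent).length : Int) + ((pvBTable (s+1) rest).length : Int)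
      · rw [if_pos ⟨hB.1, by omega⟩]
        have hTne : pvBTable s (sent :: rest) ≠ [] := by
          rw [pvBTable]
          intro h
          exact hB.1 (List.append_eq_nil_iff.mp h).2
        rw [if_pos ⟨hTne, by omega⟩, pvBTable]
        rcases hnA with hws | hpos
        · simp only [hws, List.length_nil, Nat.cast_zero, PySem.List.pyRange_zero_nat]
          norm_num
        · have h1 : max (position - (c + ((PySem.Str.split₀ sent).length : Int))) 1
              = position - c - ((PySem.Str.split₀ sent).length : Int) := by omega
          have h2 : max (position - c) 1 = position - c := by omega
          rw [h1, h2, List.getD_append_right _ _ _ _ (by rw [hfl]; omega)]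
          congr 1
          omega
      · rw [if_neg hB]
        have hTcond : ¬ (pvBTable s (sent :: rest) ≠ [] ∧
            position ≤ c + ((pvBTable s (sent :: rest)).length : Int)) := by
          intro hc
          have hT := hc.2
          rw [hlen] at hT
          rcases Decidable.em (pvBTable (s+1) rest = []) with he | he
          · rcases hnA with hws | hpos
            · refine hc.1 ?_
              rw [pvBTable, hws, he]
              norm_num [PySem.List.pyRange_zero_nat]
            · rw [he] at hT
              simp at hT
              omega
          · exact hB ⟨he, by omega⟩
        rw [if_neg hTcond]
        have hww : pvLastWW rest (if (PySem.Str.split₀ sent).isEmpty then ww0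
              else some (0 + ((PySem.Str.split₀ sent).length : Int) - 1))
            = pvLastWW (sent :: rest) ww0 := by
          rw [pvLastWW, pvLastWW, List.foldl_cons]
          congr 1
          split <;> norm_num
        rw [hww]
        rcases Decidable.em (rest = []) with hr | hr
        · subst hr
          simp
        · have h1 : rest.isEmpty = false := by simp [hr]
          simp only [h1, List.isEmpty_cons, Bool.false_eq_true, if_false, Option.getD_some,
            List.length_cons]
          refine Prod.ext ?_ rfl
          show s + 1 + (rest.length : Int) - 1 = s + ((rest.length : Nat) + 1 : Nat) - 1
          push_cast
          omega

lemma pvBTable_length (s : Int) (sents : List String) :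
    (pvBTable s sents).length = (sents.map (fun t => (PySem.Str.split₀ t).length)).sum := by
  induction sents generalizing s with
  | nil => simp [pvBTable]
  | cons sent rest ih =>
    rw [pvBTable, List.length_append, ih]
    simp [PySem.List.length_pyRange_one]

lemma pv_getLastD_cons_ne (a d : String) (l : List String) (h : l ≠ []) :
    (a :: l).getLastD d = l.getLastD d := by
  have hsome : l.getLast?.isSome := by
    cases h2 : l.getLast? with
    | none => exact absurd (List.getLast?_eq_none_iff.mp h2) h
    | some z => rfl
  rcases Option.isSome_iff_exists.mp hsome with ⟨z, hz⟩
  rw [List.getLastD_cons, List.getLastD_eq_getLast?, List.getLastD_eq_getLast?, hz]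
  rfl

lemma pvBTable_ne_nil (s : Int) (sents : List String)
    (h : (sents.any (fun t => !(PySem.Str.split₀ t).isEmpty)) = true) :
    pvBTable s sents ≠ [] := by
  intro hc
  have hl := congrArg List.length hc
  rw [pvBTable_length] at hl
  simp at hl
  rcases List.any_eq_true.mp h with ⟨t, ht, hw⟩
  have h0 : (PySem.Str.split₀ t).length = 0 :=
    List.sum_eq_zero_iff.mp hl _ (List.mem_map.mpr ⟨t, ht, rfl⟩)
  simp at hw
  exact hw (List.length_eq_zero_iff.mp h0)

lemma pvLastWW_last (sents : List String) (ww0 : Option Int)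
    (hne : sents ≠ []) (hl : PySem.Str.split₀ (sents.getLastD "") ≠ []) :
    pvLastWW sents ww0 = some (((PySem.Str.split₀ (sents.getLastD "")).length : Int) - 1) := by
  induction sents generalizing ww0 with
  | nil => exact absurd rfl hne
  | cons sent rest ih =>
    rcases Decidable.em (rest = []) with hr | hr
    · subst hr
      rw [List.getLastD_cons, List.getLastD_nil] at hl ⊢
      rw [pvLastWW]
      simp only [List.foldl_cons, List.foldl_nil]
      rw [if_neg (by simpa using hl)]
    · have hlast : (sent :: rest).getLastD "" = rest.getLastD "" :=
        pv_getLastD_cons_ne sent "" rest hr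
      rw [hlast] at hl ⊢
      have : pvLastWW (sent :: rest) ww0 = pvLastWW rest
          (if (PySem.Str.split₀ sent).isEmpty then ww0
           else some (((PySem.Str.split₀ sent).length : Int) - 1)) := by
        rw [pvLastWW, pvLastWW, List.foldl_cons]
      rw [this, ih _ hr hl]

lemma pvBTable_getLast? (s : Int) (sents : List String)
    (hne : sents ≠ []) (hl : PySem.Str.split₀ (sents.getLastD "") ≠ []) :
    (pvBTable s sents).getLast? =
      some (s + (sents.length : Int) - 1, ((PySem.Str.split₀ (sents.getLastD "")).length : Int) - 1) := by
  induction sents generalizing s with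
  | nil => exact absurd rfl hne
  | cons sent rest ih =>
    rcases Decidable.em (rest = []) with hr | hr
    · subst hr
      rw [List.getLastD_cons, List.getLastD_nil] at hl
      rw [pvBTable, pvBTable, List.append_nil]
      have hn : (PySem.Str.split₀ sent).length ≠ 0 := by simpa using hl
      rw [List.getLast?_eq_getElem?]
      have hlen : ((PySem.List.pyRange 0 ((PySem.Str.split₀ sent).length : Int) 1).map
          (fun ww => ((s : Int), ww))).length = (PySem.Str.split₀ sent).length := by
        simp [PySem.List.length_pyRange_one]
      rw [hlen, PySem.List.getElem?_map_pyRange_zero _ _ _ (by omega)]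
      simp [List.getLastD_cons, List.getLastD_nil]
      omega
    · have hlast : (sent :: rest).getLastD "" = rest.getLastD "" :=
        pv_getLastD_cons_ne sent "" rest hr
      rw [hlast] at hl
      rw [pvBTable, List.getLast?_append, ih (s+1) hr hl, hlast, Option.some_or]
      refine congrArg some (Prod.ext ?_ rfl)
      show s + 1 + (rest.length : Int) - 1 = s + ((sent :: rest).length : Int) - 1
      simp only [List.length_cons]
      push_cast
      ring

lemma pvBTable_fst_mem (s : Int) (sents : List String) (p : Int × Int)
    (hp : p ∈ pvBTable s sents) :
    ∃ k : Nat, k < sents.length ∧ p.1 = s + (k : Int) ∧ PySem.Str.split₀ (sents.getD k "") ≠ [] := by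
  induction sents generalizing s with
  | nil => simp [pvBTable] at hp
  | cons sent rest ih =>
    rw [pvBTable, List.mem_append] at hp
    rcases hp with hp | hp
    · rcases List.mem_map.mp hp with ⟨ww, hww, rfl⟩
      refine ⟨0, by simp, by simp, ?_⟩
      have := PySem.List.mem_pyRange_one.mp hww
      intro hc
      simp only [List.getD_cons_zero] at hc
      rw [hc] at this
      simp at this
      omega
    · rcases ih (s+1) hp with ⟨k, hk, hfst, hsp⟩
      exact ⟨k+1, by simpa using hk, by rw [hfst]; push_cast; ring, by simpa using hsp⟩

-- ===== VERDICT (by name: the statement is the Claim_ definition above) =====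
lemma pv_main (questions : List (Int × List String)) (question position : Int)
    (hpre : Pre_word_position_to_sent questions question position)
    (hnd : ¬ D_word_position_to_sent questions question position) :
    word_position_to_sent questions question position
      = word_position_to_sent_alt questions question position := by
  unfold word_position_to_sent word_position_to_sent_alt
  set sents := ((PySem.Dict.mk questions).get? question).getD [] with hsents
  unfold Pre_word_position_to_sent at hpre
  rw [← hsents] at hpre
  have hTne : pvBTable 0 sents ≠ [] := pvBTable_ne_nil 0 sents hpre
  have hT1 : 1 ≤ ((pvBTable 0 sents).length : Int) := by
    rcases List.exists_cons_of_ne_nil hTne with ⟨y, ys, hy⟩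
    rw [hy]
    simp
  rw [pvAOuter_eq]
  by_cases h : position ≤ 0 + ((pvBTable 0 sents).length : Int)
  · rw [if_pos ⟨hTne, h⟩]
    have hmin : min (max position 1) ((pvBTable 0 sents).length : Int)
        = max position 1 := by omega
    have hidx0 : (0:Int) ≤ max position 1 - 1 := by omega
    have hidxlt : (max position 1 - 1).toNat < (pvBTable 0 sents).length := by omega
    show _ = (PySem.List.pyGet? _ (min (max position 1) (((pvBTable 0 sents).length : Nat) : Int) - 1)).getD (0,0)
    rw [hmin, PySem.List.pyGet?_of_nonneg _ hidx0, ← List.getD_eq_getElem?_getD]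
    congr 2
    omega
  · rw [if_neg (by intro hc; exact h hc.2)]
    have hse : sents ≠ [] := by
      intro hc
      rw [hc] at hpre
      simp at hpre
    have hlastne : PySem.Str.split₀ (sents.getLastD "") ≠ [] := by
      intro hc
      refine hnd ?_
      unfold D_word_position_to_sent
      rw [← hsents]
      refine ⟨?_, hc⟩
      rw [← pvBTable_length 0 sents]
      omega
    have hmin : min (max position 1) ((pvBTable 0 sents).length : Int)
        = ((pvBTable 0 sents).length : Int) := by omega
    show _ = (PySem.List.pyGet? _ (min (max position 1) (((pvBTable 0 sents).length : Nat) : Int) - 1)).getD (0,0)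
    rw [hmin, PySem.List.pyGet?_of_nonneg _ (by omega)]
    have hix : (((pvBTable 0 sents).length : Int) - 1).toNat = (pvBTable 0 sents).length - 1 := by
      omega
    rw [hix, ← List.getLast?_eq_getElem?, pvBTable_getLast? 0 sents hse hlastne,
      pvLastWW_last sents none hse hlastne]
    simp [List.isEmpty_eq_false_iff.mpr hse]

theorem word_position_to_sent_spec : Claim_unchanged_word_position_to_sent := by
  intro questions question position _ hpre
  unfold Spec_word_position_to_sent
  intro hnd
  exact pv_main questions question position hpre hnd

theorem word_position_to_sent_changed : Claim_changed_word_position_to_sent := by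
  unfold Claim_changed_word_position_to_sent; decide

theorem word_position_to_sent_tight : Claim_exact_word_position_to_sent := by
  intro questions question position _ hpre hD
  unfold word_position_to_sent word_position_to_sent_alt
  set sents := ((PySem.Dict.mk questions).get? question).getD [] with hsents
  unfold Pre_word_position_to_sent at hpre
  unfold D_word_position_to_sent at hD
  rw [← hsents] at hpre hD
  rcases hD with ⟨htot, hlast⟩
  rw [← pvBTable_length 0 sents] at htot
  have hTne : pvBTable 0 sents ≠ [] := pvBTable_ne_nil 0 sents hpre
  have hT1 : 1 ≤ ((pvBTable 0 sents).length : Int) := by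
    rcases List.exists_cons_of_ne_nil hTne with ⟨y, ys, hy⟩
    rw [hy]
    simp
  have hse : sents ≠ [] := by
    intro hc
    rw [hc] at hpre
    simp at hpre
  rw [pvAOuter_eq, if_neg (by intro hc; omega)]
  -- B's lookup is the table's last entry
  have hmin : min (max position 1) ((pvBTable 0 sents).length : Int)
      = ((pvBTable 0 sents).length : Int) := by omega
  show _ ≠ (PySem.List.pyGet? _ (min (max position 1) (((pvBTable 0 sents).length : Nat) : Int) - 1)).getD (0,0)
  rw [hmin, PySem.List.pyGet?_of_nonneg _ (by omega)]
  have hix : (((pvBTable 0 sents).length : Int) - 1).toNat = (pvBTable 0 sents).length - 1 := by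
    omega
  rw [hix, ← List.getLast?_eq_getElem?]
  rcases hb : (pvBTable 0 sents).getLast? with _ | b
  · exact absurd (List.getLast?_eq_none_iff.mp hb) hTne
  · rcases pvBTable_fst_mem 0 sents b (List.mem_of_getLast? hb) with ⟨k, hk, hfst, hsp⟩
    have hkne : k ≠ sents.length - 1 := by
      intro hc
      refine hsp ?_
      have : sents.getD k "" = sents.getLastD "" := by
        rw [hc, List.getD_eq_getElem?_getD, ← List.getLast?_eq_getElem?,
          List.getLastD_eq_getLast?]
      rw [this, hlast]
    intro hc
    have h1 := congrArg Prod.fst hc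
    simp [List.isEmpty_eq_false_iff.mpr hse] at h1
    rw [hfst] at h1
    have hlen1 : 1 ≤ sents.length := by
      rcases List.exists_cons_of_ne_nil hse with ⟨y, ys, hy⟩
      rw [hy]
      simp
    omega
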